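-- pv_equiv track=rewrite | github.com/vibheksoni/crawl | src/crawl/sdk/whatweb_import.py | extract_hash_blocks
-- ===== SOURCE A (Python) =====
-- def extract_hash_blocks(block: str) -> list[str]:
--     """Extract top-level Ruby hash blocks from a larger block.
--
--     Args:
--         block: Source block text.
--
--     Returns:
--         Top-level hash entry strings.
--     """
--     hashes = []
--     depth = 0
--     start_index = -1
--     quote = ""
--     escaped = False
--     regex_mode = False
--
--     for index, current in enumerate(block):
--         previous = block[index - 1] if index > 0 else ""
--
--         if quote:
--             if escaped:
--                 escaped = False
--                 continue
--             if current == "\\":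
--                 escaped = True
--                 continue
--             if current == quote:
--                 quote = ""
--             continue
--
--         if regex_mode:
--             if escaped:
--                 escaped = False
--                 continue
--             if current == "\\":
--                 escaped = True
--                 continue
--             if current == "/" and previous != "\\":
--                 regex_mode = False
--             continue
--
--         if current in {'"', "'"}:
--             quote = current
--             continue
--         if current == "/" and previous in ("=", ">", " ", ",", "{", "[", "(", "\n"):
--             regex_mode = True
--             continue
--         if current == "{":
--             if depth == 0:
--                 start_index = index
--             depth += 1
--             continue
--         if current == "}":
--             depth -= 1
--             if depth == 0 and start_index != -1:
--                 hashes.append(block[start_index : index + 1])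
--                 start_index = -1
--     return hashes
-- ===== SOURCE B (Python) =====
-- def _skip_string(s, q, j):
--     n = len(s)
--     while j < n:
--         c = s[j]
--         if c == "\\":
--             j += 2
--         elif c == q:
--             return j + 1
--         else:
--             j += 1
--     return n
--
--
-- def _skip_regex(s, j):
--     n = len(s)
--     while j < n:
--         c = s[j]
--         if c == "\\":
--             j += 2
--         elif c == "/" and s[j - 1] != "\\":
--             return j + 1
--         else:
--             j += 1
--     return n
--
--
-- def extract_hash_blocks(block: str) -> list[str]:
--     """Extract top-level Ruby hash blocks from a larger block."""
--     hashes = []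
--     depth = 0
--     start = -1
--     i = 0
--     n = len(block)
--     while i < n:
--         c = block[i]
--         if c == '"' or c == "'":
--             i = _skip_string(block, c, i + 1)
--         elif c == "/" and i > 0 and block[i - 1] in "=> ,{[(\n":
--             i = _skip_regex(block, i + 1)
--         else:
--             if c == "{":
--                 if depth == 0:
--                     start = i
--                 depth += 1
--             elif c == "}":
--                 depth -= 1
--                 if depth == 0 and start != -1:
--                     hashes.append(block[start : i + 1])
--                     start = -1
--             i += 1
--     return hashes
-- ===== Notes on version B (the rewrite author's own statement) =====
-- stated objective: simpler
-- what changed: A's flat per-character six-variable state machine (quote/escaped/regex_mode flags threaded through every iteration) is replaced by a while-loop over an explicit index that handles only braces, delegating whole string and regex literals to two small sub-scanners that jump the index past the literal.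
import Mathlib
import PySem

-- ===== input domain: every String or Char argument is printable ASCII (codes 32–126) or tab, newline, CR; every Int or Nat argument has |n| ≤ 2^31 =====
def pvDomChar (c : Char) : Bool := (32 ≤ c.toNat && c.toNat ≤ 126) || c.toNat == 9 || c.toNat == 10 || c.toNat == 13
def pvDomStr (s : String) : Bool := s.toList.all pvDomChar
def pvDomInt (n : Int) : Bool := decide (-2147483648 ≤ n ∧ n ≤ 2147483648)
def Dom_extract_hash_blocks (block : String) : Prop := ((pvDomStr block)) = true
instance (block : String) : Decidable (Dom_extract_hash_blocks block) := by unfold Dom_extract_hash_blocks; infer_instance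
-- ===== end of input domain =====

-- B rewrites A's flat six-state per-character machine as an outer brace scanner plus two
-- literal-consuming sub-scanners (strings and regexes), for simplicity; same return value.

-- ===== PORT A =====
-- One step of A's `for index, current in enumerate(block)` loop per recursive call, over the
-- character list; state = (hashes, depth, start_index, quote, escaped, regex_mode).
-- quote : Option Char (Python "" ↔ none); previous : Option Char (Python "" ↔ none).
-- cs.getD i ' ' is block[index] (in range since i < cs.length); the default is never read.
def goA (cs : List Char) (i : Nat) (hashes : List (List Char)) (depth startIdx : Int)
    (quote : Option Char) (escaped regexMode : Bool) : List (List Char) :=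
  if i < cs.length then
    let current := cs.getD i ' '
    let previous : Option Char := if 0 < i then some (cs.getD (i - 1) ' ') else none
    if quote.isSome then
      if escaped then goA cs (i+1) hashes depth startIdx quote false regexMode
      else if current = '\\' then goA cs (i+1) hashes depth startIdx quote true regexMode
      else if some current = quote then goA cs (i+1) hashes depth startIdx none escaped regexMode
      else goA cs (i+1) hashes depth startIdx quote escaped regexMode
    else if regexMode then
      if escaped then goA cs (i+1) hashes depth startIdx quote false regexMode
      else if current = '\\' then goA cs (i+1) hashes depth startIdx quote true regexMode
      else if current = '/' ∧ previous ≠ some '\\' then goA cs (i+1) hashes depth startIdx quote escaped false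
      else goA cs (i+1) hashes depth startIdx quote escaped regexMode
    else if current = '"' ∨ current = '\'' then goA cs (i+1) hashes depth startIdx (some current) escaped regexMode
    else if current = '/' ∧ previous ∈ [some '=', some '>', some ' ', some ',', some '{', some '[', some '(', some '\n'] then
      goA cs (i+1) hashes depth startIdx quote escaped true
    else if current = '{' then
      goA cs (i+1) hashes (depth + 1) (if depth = 0 then (i : Int) else startIdx) quote escaped regexMode
    else if current = '}' then
      if depth - 1 = 0 ∧ startIdx ≠ -1 then
        goA cs (i+1) (hashes ++ [PySem.List.slice cs (some startIdx) (some ((i : Int) + 1))]) (depth - 1) (-1) quote escaped regexMode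
      else goA cs (i+1) hashes (depth - 1) startIdx quote escaped regexMode
    else goA cs (i+1) hashes depth startIdx quote escaped regexMode
  else hashes
termination_by cs.length - i
decreasing_by all_goals omega

def extract_hash_blocks (block : String) : List String :=
  (goA block.toList 0 [] 0 (-1) none false false).map (fun l => String.ofList l)

-- ===== PORT B =====
-- _skip_string: advance past a string literal opened by quote q; j is the index after the
-- opening quote; returns the index after the closing quote (or len on unterminated).
def skipString (cs : List Char) (q : Char) (j : Nat) : Nat :=
  if j < cs.length then
    if cs.getD j ' ' = '\\' then skipString cs q (j + 2)
    else if cs.getD j ' ' = q then j + 1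
    else skipString cs q (j + 1)
  else cs.length
termination_by cs.length - j
decreasing_by all_goals omega

-- _skip_regex: advance past a regex literal; s[j-1] is cs.getD (j-1) ' ' (j ≥ 1 at every call).
def skipRegex (cs : List Char) (j : Nat) : Nat :=
  if j < cs.length then
    if cs.getD j ' ' = '\\' then skipRegex cs (j + 2)
    else if cs.getD j ' ' = '/' ∧ cs.getD (j - 1) ' ' ≠ '\\' then j + 1
    else skipRegex cs (j + 1)
  else cs.length
termination_by cs.length - j
decreasing_by all_goals omega

-- the sub-scanners never move backwards past i (termination of the outer loop)
theorem lt_skipString (cs : List Char) (q : Char) (j i : Nat) (h1 : i < j) (h2 : i < cs.length) :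
    i < skipString cs q j := by
  unfold skipString
  split
  · split
    · exact lt_skipString cs q (j + 2) i (by omega) h2
    · split
      · omega
      · exact lt_skipString cs q (j + 1) i (by omega) h2
  · omega
termination_by cs.length - j
decreasing_by all_goals omega

theorem lt_skipRegex (cs : List Char) (j i : Nat) (h1 : i < j) (h2 : i < cs.length) :
    i < skipRegex cs j := by
  unfold skipRegex
  split
  · split
    · exact lt_skipRegex cs (j + 2) i (by omega) h2
    · split
      · omega
      · exact lt_skipRegex cs (j + 1) i (by omega) h2
  · omega
termination_by cs.length - j
decreasing_by all_goals omega

-- outer while-loop of B: only structural characters; literals are consumed by the sub-scanners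
def goB (cs : List Char) (i : Nat) (depth startIdx : Int) (acc : List (List Char)) : List (List Char) :=
  if h : i < cs.length then
    if cs.getD i ' ' = '"' ∨ cs.getD i ' ' = '\'' then
      goB cs (skipString cs (cs.getD i ' ') (i + 1)) depth startIdx acc
    else if cs.getD i ' ' = '/' ∧ 0 < i ∧ cs.getD (i - 1) ' ' ∈ ['=', '>', ' ', ',', '{', '[', '(', '\n'] then
      goB cs (skipRegex cs (i + 1)) depth startIdx acc
    else if cs.getD i ' ' = '{' then
      goB cs (i + 1) (depth + 1) (if depth = 0 then (i : Int) else startIdx) acc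
    else if cs.getD i ' ' = '}' then
      if depth - 1 = 0 ∧ startIdx ≠ -1 then
        goB cs (i + 1) (depth - 1) (-1) (acc ++ [PySem.List.slice cs (some startIdx) (some ((i : Int) + 1))])
      else goB cs (i + 1) (depth - 1) startIdx acc
    else goB cs (i + 1) depth startIdx acc
  else acc
termination_by cs.length - i
decreasing_by
  · exact Nat.sub_lt_sub_left h (lt_skipString cs _ (i + 1) i (by omega) h)
  · exact Nat.sub_lt_sub_left h (lt_skipRegex cs (i + 1) i (by omega) h)
  all_goals omega

def extract_hash_blocks_alt (block : String) : List String :=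
  (goB block.toList 0 0 (-1) []).map (fun l => String.ofList l)

-- ===== PRECONDITION & SPEC =====
def Spec_extract_hash_blocks (block : String) (out : List String) : Prop := out = extract_hash_blocks_alt block
instance (block : String) (out : List String) : Decidable (Spec_extract_hash_blocks block out) := by unfold Spec_extract_hash_blocks; infer_instance

-- ===== CLAIM (what is proved, stated in full; the proofs are below) =====
def Claim_equal_extract_hash_blocks : Prop := ∀ (block : String), Dom_extract_hash_blocks block → Spec_extract_hash_blocks block (extract_hash_blocks block)

-- ===== LEMMAS AND PROOFS =====

theorem goA_stop (cs : List Char) (i : Nat) (hashes : List (List Char)) (d s : Int) (q : Option Char) (e r : Bool)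
    (h : ¬ i < cs.length) : goA cs i hashes d s q e r = hashes := by
  rw [goA.eq_def]; simp [h]

theorem goA_quote_esc (cs : List Char) (i : Nat) (hashes : List (List Char)) (d s : Int) (q : Char) (r : Bool)
    (h : i < cs.length) :
    goA cs i hashes d s (some q) true r = goA cs (i+1) hashes d s (some q) false r := by
  rw [goA.eq_def]; simp [h]

theorem goA_quote_bs (cs : List Char) (i : Nat) (hashes : List (List Char)) (d s : Int) (q : Char) (r : Bool)
    (h : i < cs.length) (hc : cs.getD i ' ' = '\\') :
    goA cs i hashes d s (some q) false r = goA cs (i+1) hashes d s (some q) true r := by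
  rw [List.getD_eq_getElem _ _ h] at hc
  rw [goA.eq_def]; simp [h, hc]

theorem goA_quote_close (cs : List Char) (i : Nat) (hashes : List (List Char)) (d s : Int) (q : Char) (r : Bool)
    (h : i < cs.length) (hbs : cs.getD i ' ' ≠ '\\') (hc : cs.getD i ' ' = q) :
    goA cs i hashes d s (some q) false r = goA cs (i+1) hashes d s none false r := by
  rw [List.getD_eq_getElem _ _ h] at hc hbs
  rw [hc] at hbs
  rw [goA.eq_def]; simp [h, hc, hbs]

theorem goA_quote_other (cs : List Char) (i : Nat) (hashes : List (List Char)) (d s : Int) (q : Char) (r : Bool)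
    (h : i < cs.length) (hbs : cs.getD i ' ' ≠ '\\') (hc : cs.getD i ' ' ≠ q) :
    goA cs i hashes d s (some q) false r = goA cs (i+1) hashes d s (some q) false r := by
  rw [List.getD_eq_getElem _ _ h] at hc hbs
  rw [goA.eq_def]; simp [h, hc, hbs]

theorem goA_regex_esc (cs : List Char) (i : Nat) (hashes : List (List Char)) (d s : Int)
    (h : i < cs.length) :
    goA cs i hashes d s none true true = goA cs (i+1) hashes d s none false true := by
  rw [goA.eq_def]; simp [h]

theorem goA_regex_bs (cs : List Char) (i : Nat) (hashes : List (List Char)) (d s : Int)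
    (h : i < cs.length) (hc : cs.getD i ' ' = '\\') :
    goA cs i hashes d s none false true = goA cs (i+1) hashes d s none true true := by
  rw [List.getD_eq_getElem _ _ h] at hc
  rw [goA.eq_def]; simp [h, hc]

theorem goA_regex_close (cs : List Char) (i : Nat) (hashes : List (List Char)) (d s : Int)
    (h : i < cs.length) (hi : 0 < i) (hc : cs.getD i ' ' = '/') (hp : cs.getD (i-1) ' ' ≠ '\\') :
    goA cs i hashes d s none false true = goA cs (i+1) hashes d s none false false := by
  rw [List.getD_eq_getElem _ _ h] at hc
  simp only [List.getD] at hp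
  rw [goA.eq_def]; simp [h, hc, hi]
  intro n1
  exact absurd n1 hp

theorem goA_regex_other (cs : List Char) (i : Nat) (hashes : List (List Char)) (d s : Int)
    (h : i < cs.length) (hbs : cs.getD i ' ' ≠ '\\')
    (hno : ¬ (cs.getD i ' ' = '/' ∧ (if 0 < i then some (cs.getD (i-1) ' ') else none) ≠ some '\\')) :
    goA cs i hashes d s none false true = goA cs (i+1) hashes d s none false true := by
  rw [List.getD_eq_getElem _ _ h] at hbs
  simp only [List.getD] at hno
  rw [List.getElem?_eq_getElem h] at hno
  simp only [Option.getD_some] at hno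
  rw [goA.eq_def]; simp [h, hbs]
  intro h1 h2
  refine absurd ⟨h1, ?_⟩ hno
  by_cases hi : 0 < i
  · simp only [if_pos hi, ne_eq, Option.some.injEq]
    exact h2 hi
  · simp [hi]
theorem goA_code_quote (cs : List Char) (i : Nat) (hashes : List (List Char)) (d s : Int)
    (h : i < cs.length) (hq : cs.getD i ' ' = '"' ∨ cs.getD i ' ' = '\'') :
    goA cs i hashes d s none false false = goA cs (i+1) hashes d s (some (cs.getD i ' ')) false false := by
  rw [List.getD_eq_getElem _ _ h] at hq ⊢
  rw [goA.eq_def]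
  rcases hq with hq | hq <;> simp [h, hq]

theorem goA_code_regex (cs : List Char) (i : Nat) (hashes : List (List Char)) (d s : Int)
    (h : i < cs.length) (hi : 0 < i) (hc : cs.getD i ' ' = '/')
    (hp : cs.getD (i-1) ' ' ∈ ['=', '>', ' ', ',', '{', '[', '(', '\n']) :
    goA cs i hashes d s none false false = goA cs (i+1) hashes d s none false true := by
  rw [List.getD_eq_getElem _ _ h] at hc
  simp only [List.getD] at hp
  rw [goA.eq_def]; simp [h, hc, hi]
  intro n1 n2 n3 n4 n5 n6 n7 n8
  simp only [List.mem_cons, List.not_mem_nil, or_false] at hp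
  tauto

theorem goA_code_open (cs : List Char) (i : Nat) (hashes : List (List Char)) (d s : Int)
    (h : i < cs.length) (hc : cs.getD i ' ' = '{') :
    goA cs i hashes d s none false false
      = goA cs (i+1) hashes (d + 1) (if d = 0 then (i : Int) else s) none false false := by
  rw [List.getD_eq_getElem _ _ h] at hc
  rw [goA.eq_def]; simp [h, hc]

theorem goA_code_close (cs : List Char) (i : Nat) (hashes : List (List Char)) (d s : Int)
    (h : i < cs.length) (hc : cs.getD i ' ' = '}') :
    goA cs i hashes d s none false false
      = if d - 1 = 0 ∧ s ≠ -1 then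
          goA cs (i+1) (hashes ++ [PySem.List.slice cs (some s) (some ((i : Int) + 1))]) (d - 1) (-1) none false false
        else goA cs (i+1) hashes (d - 1) s none false false := by
  rw [List.getD_eq_getElem _ _ h] at hc
  rw [goA.eq_def]; simp [h, hc]

theorem goA_code_other (cs : List Char) (i : Nat) (hashes : List (List Char)) (d s : Int)
    (h : i < cs.length) (hq : ¬ (cs.getD i ' ' = '"' ∨ cs.getD i ' ' = '\''))
    (hr : ¬ (cs.getD i ' ' = '/' ∧ 0 < i ∧ cs.getD (i-1) ' ' ∈ ['=', '>', ' ', ',', '{', '[', '(', '\n']))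
    (ho : cs.getD i ' ' ≠ '{') (hcl : cs.getD i ' ' ≠ '}') :
    goA cs i hashes d s none false false = goA cs (i+1) hashes d s none false false := by
  rw [List.getD_eq_getElem _ _ h] at hq ho hcl
  simp only [List.getD] at hr
  rw [List.getElem?_eq_getElem h] at hr
  simp only [Option.getD_some] at hr
  rw [goA.eq_def]
  rw [not_or] at hq
  simp [h, hq.1, hq.2, ho, hcl]
  intro h1 h2
  refine absurd ⟨h1, ?_⟩ hr
  rcases h2 with ⟨hi, e⟩ | ⟨hi, e⟩ | ⟨hi, e⟩ | ⟨hi, e⟩ | ⟨hi, e⟩ | ⟨hi, e⟩ | ⟨hi, e⟩ | ⟨hi, e⟩ <;>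
    exact ⟨hi, by simp [e]⟩
theorem stringPhase (cs : List Char) (q : Char) (j : Nat) (hashes : List (List Char))
    (depth startIdx : Int) :
    goA cs j hashes depth startIdx (some q) false false
      = goA cs (skipString cs q j) hashes depth startIdx none false false := by
  rw [skipString.eq_def]
  by_cases h : j < cs.length
  · simp only [if_pos h]
    by_cases hbs : cs.getD j ' ' = '\\'
    · simp only [if_pos hbs]
      rw [goA_quote_bs cs j hashes depth startIdx q false h hbs]
      by_cases h2 : j + 1 < cs.length
      · rw [goA_quote_esc cs (j+1) hashes depth startIdx q false h2]
        exact stringPhase cs q (j + 2) hashes depth startIdx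
      · rw [goA_stop cs (j+1) hashes depth startIdx (some q) true false h2]
        rw [← stringPhase cs q (j + 2) hashes depth startIdx]
        rw [goA_stop cs (j+2) hashes depth startIdx (some q) false false (by omega)]
    · simp only [if_neg hbs]
      by_cases hq : cs.getD j ' ' = q
      · simp only [if_pos hq]
        exact goA_quote_close cs j hashes depth startIdx q false h hbs hq
      · simp only [if_neg hq]
        rw [goA_quote_other cs j hashes depth startIdx q false h hbs hq]
        exact stringPhase cs q (j + 1) hashes depth startIdx
  · simp only [if_neg h]
    rw [goA_stop cs j hashes depth startIdx (some q) false false h]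
    rw [goA_stop cs cs.length hashes depth startIdx none false false (by omega)]
termination_by cs.length - j
decreasing_by all_goals omega

theorem regexPhase (cs : List Char) (j : Nat) (hj : 0 < j) (hashes : List (List Char))
    (depth startIdx : Int) :
    goA cs j hashes depth startIdx none false true
      = goA cs (skipRegex cs j) hashes depth startIdx none false false := by
  rw [skipRegex.eq_def]
  by_cases h : j < cs.length
  · simp only [if_pos h]
    by_cases hbs : cs.getD j ' ' = '\\'
    · simp only [if_pos hbs]
      rw [goA_regex_bs cs j hashes depth startIdx h hbs]
      by_cases h2 : j + 1 < cs.length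
      · rw [goA_regex_esc cs (j+1) hashes depth startIdx h2]
        exact regexPhase cs (j + 2) (by omega) hashes depth startIdx
      · rw [goA_stop cs (j+1) hashes depth startIdx none true true h2]
        rw [← regexPhase cs (j + 2) (by omega) hashes depth startIdx]
        rw [goA_stop cs (j+2) hashes depth startIdx none false true (by omega)]
    · simp only [if_neg hbs]
      by_cases hcl : cs.getD j ' ' = '/' ∧ cs.getD (j - 1) ' ' ≠ '\\'
      · simp only [if_pos hcl]
        exact goA_regex_close cs j hashes depth startIdx h hj hcl.1 hcl.2
      · simp only [if_neg hcl]
        rw [goA_regex_other cs j hashes depth startIdx h hbs ?_]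
        · exact regexPhase cs (j + 1) (by omega) hashes depth startIdx
        · simp only [if_pos hj, ne_eq, Option.some.injEq]
          intro hcon
          exact hcl ⟨hcon.1, hcon.2⟩
  · simp only [if_neg h]
    rw [goA_stop cs j hashes depth startIdx none false true h]
    rw [goA_stop cs cs.length hashes depth startIdx none false false (by omega)]
termination_by cs.length - j
decreasing_by all_goals omega

theorem mainPhase (cs : List Char) (i : Nat) (depth startIdx : Int) (acc : List (List Char)) :
    goA cs i acc depth startIdx none false false = goB cs i depth startIdx acc := by
  rw [goB.eq_def]
  by_cases h : i < cs.length
  · simp only [dif_pos h]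
    by_cases hq : cs.getD i ' ' = '"' ∨ cs.getD i ' ' = '\''
    · simp only [if_pos hq]
      rw [goA_code_quote cs i acc depth startIdx h hq]
      rw [stringPhase cs (cs.getD i ' ') (i + 1) acc depth startIdx]
      have hlt := lt_skipString cs (cs.getD i ' ') (i + 1) i (by omega) h
      exact mainPhase cs (skipString cs (cs.getD i ' ') (i + 1)) depth startIdx acc
    · simp only [if_neg hq]
      by_cases hr : cs.getD i ' ' = '/' ∧ 0 < i ∧ cs.getD (i - 1) ' ' ∈ ['=', '>', ' ', ',', '{', '[', '(', '\n']
      · simp only [if_pos hr]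
        rw [goA_code_regex cs i acc depth startIdx h hr.2.1 hr.1 hr.2.2]
        rw [regexPhase cs (i + 1) (by omega) acc depth startIdx]
        have hlt := lt_skipRegex cs (i + 1) i (by omega) h
        exact mainPhase cs (skipRegex cs (i + 1)) depth startIdx acc
      · simp only [if_neg hr]
        by_cases ho : cs.getD i ' ' = '{'
        · simp only [if_pos ho]
          rw [goA_code_open cs i acc depth startIdx h ho]
          exact mainPhase cs (i + 1) (depth + 1) (if depth = 0 then (i : Int) else startIdx) acc
        · simp only [if_neg ho]
          by_cases hc : cs.getD i ' ' = '}'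
          · simp only [if_pos hc]
            rw [goA_code_close cs i acc depth startIdx h hc]
            by_cases hd : depth - 1 = 0 ∧ startIdx ≠ -1
            · simp only [if_pos hd]
              exact mainPhase cs (i + 1) (depth - 1) (-1)
                (acc ++ [PySem.List.slice cs (some startIdx) (some ((i : Int) + 1))])
            · simp only [if_neg hd]
              exact mainPhase cs (i + 1) (depth - 1) startIdx acc
          · simp only [if_neg hc]
            rw [goA_code_other cs i acc depth startIdx h hq hr ho hc]
            exact mainPhase cs (i + 1) depth startIdx acc
  · simp only [dif_neg h]
    exact goA_stop cs i acc depth startIdx none false false h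
termination_by cs.length - i
decreasing_by all_goals omega

-- ===== VERDICT (by name: the statement is the Claim_ definition above) =====
theorem extract_hash_blocks_spec : Claim_equal_extract_hash_blocks := by
  intro block _
  unfold Spec_extract_hash_blocks extract_hash_blocks extract_hash_blocks_alt
  rw [mainPhase]
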